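-- pv_equiv track=rewrite | github.com/yiju-zhao/DeepSight-Django | backend/notebooks/agents/rag_agent/utils.py | truncate_reasoning_history
-- ===== SOURCE A (Python) =====
-- def truncate_reasoning_history(
--     reasoning_steps: list[str],
--     keep_first_n: int = 1,
--     keep_last_n: int = 4
-- ) -> str:
--     """
--     Truncate reasoning history to maintain reasonable context length.
--
--     Based on DeepResearcher's strategy:
--     - Keep first N steps (initial reasoning)
--     - Keep last N steps (recent context)
--     - Add ellipsis for omitted middle steps
--
--     Args:
--         reasoning_steps: List of all reasoning steps
--         keep_first_n: Number of initial steps to preserve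
--         keep_last_n: Number of recent steps to preserve
--
--     Returns:
--         Formatted truncated history string
--
--     Example:
--         >>> steps = ["step1", "step2", "step3", "step4", "step5", "step6"]
--         >>> truncate_reasoning_history(steps, keep_first_n=1, keep_last_n=2)
--         'Step 1: step1\\n\\n...\\n\\nStep 5: step5\\n\\nStep 6: step6'
--     """
--     if len(reasoning_steps) <= keep_first_n + keep_last_n:
--         # No truncation needed
--         result = ""
--         for i, step in enumerate(reasoning_steps):
--             result += f"Step {i + 1}: {step}\n\n"
--         return result.strip()
--
--     # Build truncated history
--     truncated = ""
--
--     # Add first N steps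
--     for i in range(keep_first_n):
--         truncated += f"Step {i + 1}: {reasoning_steps[i]}\n\n"
--
--     # Add ellipsis
--     truncated += "...\n\n"
--
--     # Add last N steps
--     start_idx = len(reasoning_steps) - keep_last_n
--     for i in range(start_idx, len(reasoning_steps)):
--         truncated += f"Step {i + 1}: {reasoning_steps[i]}\n\n"
--
--     return truncated.strip()
-- ===== SOURCE B (Python) =====
-- def truncate_reasoning_history(
--     reasoning_steps: list[str],
--     keep_first_n: int = 1,
--     keep_last_n: int = 4
-- ) -> str:
--     """Single pass over the steps with a pending-ellipsis flag, joined at the end."""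
--     n = len(reasoning_steps)
--     truncating = n > keep_first_n + keep_last_n
--     tail_start = n - keep_last_n
--     parts = []
--     ellipsis_pending = truncating
--     for i, step in enumerate(reasoning_steps):
--         if not truncating or i < keep_first_n or i >= tail_start:
--             if ellipsis_pending and i >= keep_first_n:
--                 parts.append("...")
--                 ellipsis_pending = False
--             parts.append(f"Step {i + 1}: {step}")
--     if ellipsis_pending:
--         parts.append("...")
--     return "\n\n".join(parts).strip()
-- ===== Notes on version B (the rewrite author's own statement) =====
-- stated objective: simpler
-- what changed: Replaces A's two branches with three staged index-range loops of string += plus final strip by one single pass over enumerate(reasoning_steps) carrying a keep-predicate and a pending-ellipsis flag, collecting parts and joining once; B never indexes the list, so it has no negative-index wraparound.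
-- intended difference: When truncating with keep_last_n > len(reasoning_steps) (forcing keep_first_n < 0), A's tail loop indexes negative positions so it wraps around and repeats steps with labels like 'Step 0'/'Step -1'; B just emits the ellipsis and the actual steps once, which is the intended reading of 'keep the last N steps'. — e.g. on truncate_reasoning_history(["s"], -2, 2): A returns "...\n\nStep 0: s\n\nStep 1: s", B returns "...\n\nStep 1: s"
import Mathlib
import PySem

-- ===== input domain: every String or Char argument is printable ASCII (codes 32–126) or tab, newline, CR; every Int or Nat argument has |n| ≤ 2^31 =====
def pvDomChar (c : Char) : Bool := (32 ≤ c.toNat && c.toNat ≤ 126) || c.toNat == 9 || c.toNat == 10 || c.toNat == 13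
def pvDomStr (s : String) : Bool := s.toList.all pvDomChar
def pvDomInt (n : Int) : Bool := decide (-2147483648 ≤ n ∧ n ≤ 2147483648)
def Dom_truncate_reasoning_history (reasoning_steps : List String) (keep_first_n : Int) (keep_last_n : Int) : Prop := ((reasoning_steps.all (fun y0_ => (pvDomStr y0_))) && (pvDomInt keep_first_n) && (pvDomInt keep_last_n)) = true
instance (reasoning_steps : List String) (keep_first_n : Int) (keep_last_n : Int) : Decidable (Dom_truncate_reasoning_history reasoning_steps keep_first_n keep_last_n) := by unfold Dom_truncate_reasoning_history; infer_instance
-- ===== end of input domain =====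

-- B replaces A's staged index-range loops by one pass over enumerate with a pending-ellipsis flag; objective: simpler.

-- ===== PORT A =====
-- '(PySem.List.pyGet? … i).getD ""' : the 'none' (IndexError) case is excluded by Pre_, the default is never read there.
def truncate_reasoning_history (reasoning_steps : List String) (keep_first_n : Int) (keep_last_n : Int) : String :=
  if (reasoning_steps.length : Int) ≤ keep_first_n + keep_last_n then
    -- no truncation needed
    let result :=
      (PySem.List.enumerate reasoning_steps).foldl
        (fun result p => result ++ "Step " ++ PySem.Int.toStr (p.1 + 1) ++ ": " ++ p.2 ++ "\n\n") ""
    PySem.Str.strip result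
  else
    let truncated := ""
    -- add first N steps
    let truncated :=
      (PySem.List.pyRange 0 keep_first_n 1).foldl
        (fun t i => t ++ "Step " ++ PySem.Int.toStr (i + 1) ++ ": " ++ ((PySem.List.pyGet? reasoning_steps i).getD "") ++ "\n\n") truncated
    -- add ellipsis
    let truncated := truncated ++ "...\n\n"
    -- add last N steps
    let start_idx : Int := (reasoning_steps.length : Int) - keep_last_n
    let truncated :=
      (PySem.List.pyRange start_idx (reasoning_steps.length : Int) 1).foldl
        (fun t i => t ++ "Step " ++ PySem.Int.toStr (i + 1) ++ ": " ++ ((PySem.List.pyGet? reasoning_steps i).getD "") ++ "\n\n") truncated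
    PySem.Str.strip truncated

-- ===== PORT B =====
-- the loop body of Source B's single pass: state = (parts, ellipsis_pending), p = (i, step)
def pvStepB (kf ts : Int) (truncating : Bool) (st : List String × Bool) (p : Int × String) : List String × Bool :=
  if !truncating || decide (p.1 < kf) || decide (ts ≤ p.1) then
    let st := if st.2 && decide (kf ≤ p.1) then (st.1 ++ ["..."], false) else st
    (st.1 ++ ["Step " ++ PySem.Int.toStr (p.1 + 1) ++ ": " ++ p.2], st.2)
  else st

def truncate_reasoning_history_alt (reasoning_steps : List String) (keep_first_n : Int) (keep_last_n : Int) : String :=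
  let n : Int := reasoning_steps.length
  let truncating : Bool := decide (keep_first_n + keep_last_n < n)
  let tail_start : Int := n - keep_last_n
  let st := (PySem.List.enumerate reasoning_steps).foldl
      (pvStepB keep_first_n tail_start truncating) ([], truncating)
  let parts := if st.2 then st.1 ++ ["..."] else st.1
  PySem.Str.strip (PySem.Str.join "\n\n" parts)

-- ===== PRECONDITION & SPEC =====
-- Pre_ excludes exactly the inputs on which the Python A raises IndexError (and B returns there):
-- in the truncation branch, keep_first_n > len(reasoning_steps) or keep_last_n > 2*len(reasoning_steps).
def Pre_truncate_reasoning_history (reasoning_steps : List String) (keep_first_n : Int) (keep_last_n : Int) : Prop :=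
  (reasoning_steps.length : Int) ≤ keep_first_n + keep_last_n ∨
    (keep_first_n ≤ (reasoning_steps.length : Int) ∧ keep_last_n ≤ 2 * (reasoning_steps.length : Int))
instance (reasoning_steps : List String) (keep_first_n : Int) (keep_last_n : Int) : Decidable (Pre_truncate_reasoning_history reasoning_steps keep_first_n keep_last_n) := by unfold Pre_truncate_reasoning_history; infer_instance

def pvWitness_truncate_reasoning_history : List String × Int × Int := (["a", "b", "c"], 1, 1)

-- When truncating with keep_last_n > len(reasoning_steps) (forcing keep_first_n < 0), A's tail loop
-- indexes negative positions, wraps around and repeats steps with labels like 'Step 0'/'Step -1';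
-- B emits the ellipsis and the actual steps once, the intended reading of 'keep the last N steps'.
def D_truncate_reasoning_history (reasoning_steps : List String) (keep_first_n : Int) (keep_last_n : Int) : Prop :=
  keep_first_n + keep_last_n < (reasoning_steps.length : Int) ∧ (reasoning_steps.length : Int) < keep_last_n
instance (reasoning_steps : List String) (keep_first_n : Int) (keep_last_n : Int) : Decidable (D_truncate_reasoning_history reasoning_steps keep_first_n keep_last_n) := by unfold D_truncate_reasoning_history; infer_instance

def Spec_truncate_reasoning_history (reasoning_steps : List String) (keep_first_n : Int) (keep_last_n : Int) (out : String) : Prop := ¬ D_truncate_reasoning_history reasoning_steps keep_first_n keep_last_n → out = truncate_reasoning_history_alt reasoning_steps keep_first_n keep_last_n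
instance (reasoning_steps : List String) (keep_first_n : Int) (keep_last_n : Int) (out : String) : Decidable (Spec_truncate_reasoning_history reasoning_steps keep_first_n keep_last_n out) := by unfold Spec_truncate_reasoning_history; infer_instance

def pvDiffWitness_truncate_reasoning_history : List String × Int × Int := (["s"], -2, 2)
def pvDiffWitnessOut_truncate_reasoning_history : String × String :=
  ("...\n\nStep 0: s\n\nStep 1: s", "...\n\nStep 1: s")

-- ===== CLAIM (what is proved, stated in full; the proofs are below) =====
def Claim_unchanged_truncate_reasoning_history : Prop := ∀ (reasoning_steps : List String) (keep_first_n : Int) (keep_last_n : Int), Dom_truncate_reasoning_history reasoning_steps keep_first_n keep_last_n → Pre_truncate_reasoning_history reasoning_steps keep_first_n keep_last_n → Spec_truncate_reasoning_history reasoning_steps keep_first_n keep_last_n (truncate_reasoning_history reasoning_steps keep_first_n keep_last_n)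
def Claim_changed_truncate_reasoning_history : Prop := Dom_truncate_reasoning_history (pvDiffWitness_truncate_reasoning_history.1) (pvDiffWitness_truncate_reasoning_history.2.1) (pvDiffWitness_truncate_reasoning_history.2.2) ∧ Pre_truncate_reasoning_history (pvDiffWitness_truncate_reasoning_history.1) (pvDiffWitness_truncate_reasoning_history.2.1) (pvDiffWitness_truncate_reasoning_history.2.2) ∧ D_truncate_reasoning_history (pvDiffWitness_truncate_reasoning_history.1) (pvDiffWitness_truncate_reasoning_history.2.1) (pvDiffWitness_truncate_reasoning_history.2.2) ∧ truncate_reasoning_history (pvDiffWitness_truncate_reasoning_history.1) (pvDiffWitness_truncate_reasoning_history.2.1) (pvDiffWitness_truncate_reasoning_history.2.2) = pvDiffWitnessOut_truncate_reasoning_history.1 ∧ truncate_reasoning_history_alt (pvDiffWitness_truncate_reasoning_history.1) (pvDiffWitness_truncate_reasoning_history.2.1) (pvDiffWitness_truncate_reasoning_history.2.2) = pvDiffWitnessOut_truncate_reasoning_history.2 ∧ pvDiffWitnessOut_truncate_reasoning_history.1 ≠ pvDiffWitnessOut_truncate_reasoning_history.2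

def Claim_exact_truncate_reasoning_history : Prop := ∀ (reasoning_steps : List String) (keep_first_n : Int) (keep_last_n : Int), Dom_truncate_reasoning_history reasoning_steps keep_first_n keep_last_n → Pre_truncate_reasoning_history reasoning_steps keep_first_n keep_last_n → D_truncate_reasoning_history reasoning_steps keep_first_n keep_last_n → truncate_reasoning_history reasoning_steps keep_first_n keep_last_n ≠ truncate_reasoning_history_alt reasoning_steps keep_first_n keep_last_n

-- ===== LEMMAS AND PROOFS =====

-- the formatted part for index i (both ports' pieces reduce to it on in-range indices)
def pvFmtStep (reasoning_steps : List String) (i : Int) : String :=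
  "Step " ++ PySem.Int.toStr (i + 1) ++ ": " ++ PySem.List.pyGetD reasoning_steps i ""

-- the common "selected parts" list both ports' outputs are the strip-join of
def pvSelParts (rs : List String) (kf kl : Int) : List String :=
  if (rs.length : Int) ≤ kf + kl then
    (PySem.List.pyRange 0 (rs.length : Int) 1).map (pvFmtStep rs)
  else
    (PySem.List.pyRange 0 kf 1).map (pvFmtStep rs)
      ++ ["..."]
      ++ (PySem.List.pyRange ((rs.length : Int) - kl) (rs.length : Int) 1).map (pvFmtStep rs)

-- A's '+=' loop, seen on the character level: the concatenation of the per-element pieces.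
theorem pv_foldl_toList {α : Type} (l : List α) (f : α → String) (a : String) :
    (l.foldl (fun r x => r ++ f x) a).toList
      = a.toList ++ (l.map (fun x => (f x).toList)).flatten := by
  induction l generalizing a with
  | nil => simp
  | cons x xs ih => simp [List.foldl_cons, ih, String.toList_append, List.append_assoc]

-- stripping is unaffected by a trailing "\n\n"
theorem pv_strip_append_nn (x : List Char) :
    PySem.Chars.strip (x ++ ['\n', '\n']) = PySem.Chars.strip x := by
  unfold PySem.Chars.strip
  rcases h : List.dropWhile PySem.Chars.isspace x with _ | ⟨c, cs⟩ <;>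
    simp [PySem.Chars.lstrip, PySem.Chars.rstrip, List.dropWhile_append, h,
          List.dropWhile, PySem.Chars.isspace]

-- concatenating 'part ++ "\n\n"' pieces is the "\n\n"-join plus a trailing "\n\n" (if nonempty)
theorem pv_flatten_eq_join (ps : List (List Char)) :
    (ps.map (· ++ ['\n', '\n'])).flatten
      = if ps = [] then [] else PySem.Chars.join ['\n', '\n'] ps ++ ['\n', '\n'] := by
  induction ps with
  | nil => simp
  | cons p t ih =>
    rcases t with _ | ⟨q, r⟩
    · simp [PySem.Chars.join_singleton]
    · rw [List.map_cons, List.flatten_cons, ih, if_neg (by simp), if_neg (by simp),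
          PySem.Chars.join_cons_cons]
      simp

-- the key identity: strip of A's concatenation = strip of B's join, for the same parts
theorem pv_strip_key (ps : List (List Char)) :
    PySem.Chars.strip ((ps.map (· ++ ['\n', '\n'])).flatten)
      = PySem.Chars.strip (PySem.Chars.join ['\n', '\n'] ps) := by
  rw [pv_flatten_eq_join]
  rcases h : ps with _ | _
  · simp [PySem.Chars.join_nil]
  · rw [if_neg (by simp), pv_strip_append_nn]

theorem pv_fp_eq :
    (fun (r : String) (p : Int × String) => r ++ "Step " ++ PySem.Int.toStr (p.1 + 1) ++ ": " ++ p.2 ++ "\n\n")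
      = fun (r : String) (p : Int × String) => r ++ ("Step " ++ PySem.Int.toStr (p.1 + 1) ++ ": " ++ p.2 ++ "\n\n") := by
  funext r p; simp [String.append_assoc]

theorem pv_fi_eq (rs : List String) :
    (fun (t : String) (i : Int) => t ++ "Step " ++ PySem.Int.toStr (i + 1) ++ ": " ++ ((PySem.List.pyGet? rs i).getD "") ++ "\n\n")
      = fun (t : String) (i : Int) => t ++ (pvFmtStep rs i ++ "\n\n") := by
  funext t i; simp [pvFmtStep, PySem.List.pyGetD, String.append_assoc]

-- the character list of A's loop over a list of indices is the '(part ++ "\n\n")'-flatten of the parts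
theorem pv_idx_flatten (rs : List String) (l : List Int) :
    (l.map (fun i => (pvFmtStep rs i ++ "\n\n").toList)).flatten
      = (((l.map (pvFmtStep rs)).map String.toList).map (· ++ ['\n', '\n'])).flatten := by
  simp only [List.map_map]
  refine congrArg List.flatten (List.map_congr_left ?_)
  intro i _
  simp [String.toList_append]

-- A equals the strip-join of the selected parts (unconditionally)
theorem pv_A_eq_sel (rs : List String) (kf kl : Int) :
    truncate_reasoning_history rs kf kl = PySem.Str.strip (PySem.Str.join "\n\n" (pvSelParts rs kf kl)) := by
  unfold truncate_reasoning_history pvSelParts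
  by_cases hc : (rs.length : Int) ≤ kf + kl
  · simp only [hc, if_pos]
    show String.ofList _ = String.ofList _
    refine congrArg String.ofList ?_
    rw [PySem.Str.toList_join, pv_fp_eq, pv_foldl_toList,
        PySem.List.enumerate_eq_map_pyRange rs ""]
    have hmap : ((PySem.List.pyRange 0 (PySem.List.len rs) 1).map
          (fun j => ((j, PySem.List.pyGetD rs j ""))) |>.map
          (fun p => ("Step " ++ PySem.Int.toStr (p.1 + 1) ++ ": " ++ p.2 ++ "\n\n").toList))
        = (PySem.List.pyRange 0 (PySem.List.len rs) 1).map
            (fun i => (pvFmtStep rs i ++ "\n\n").toList) := by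
      simp only [List.map_map]
      refine List.map_congr_left ?_
      intro i _
      simp [pvFmtStep, String.append_assoc]
    rw [hmap, pv_idx_flatten]
    have := pv_strip_key (((PySem.List.pyRange 0 (PySem.List.len rs) 1).map (pvFmtStep rs)).map String.toList)
    simpa [PySem.List.len] using this
  · simp only [hc, if_false]
    show String.ofList _ = String.ofList _
    refine congrArg String.ofList ?_
    rw [PySem.Str.toList_join, pv_fi_eq rs, pv_foldl_toList, String.toList_append,
        pv_foldl_toList]
    rw [pv_idx_flatten, pv_idx_flatten]
    have key := pv_strip_key
      ((((PySem.List.pyRange 0 kf 1).map (pvFmtStep rs))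
          ++ ["..."]
          ++ ((PySem.List.pyRange ((rs.length : Int) - kl) (rs.length : Int) 1).map (pvFmtStep rs))).map String.toList)
    have h0 : ("" : String).toList = [] := rfl
    have h1 : ("\n\n" : String).toList = ['\n', '\n'] := rfl
    have h2 : ("...\n\n" : String).toList = ['.', '.', '.', '\n', '\n'] := rfl
    have h3 : ("..." : String).toList = ['.', '.', '.'] := rfl
    simp only [List.map_append, List.flatten_append, h0, h1, h2, h3, List.map_cons,
      List.map_nil, List.flatten_cons, List.flatten_nil, List.append_nil,
      List.nil_append, List.append_assoc] at key ⊢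
    exact key

-- B's single pass, non-truncating case: every step is kept, the flag never fires
theorem pv_B_nontrunc (rs : List String) (kf ts : Int) (j : Nat) :
    (PySem.List.pyRange 0 (j : Int) 1).foldl
        (fun st i => pvStepB kf ts false st (i, PySem.List.pyGetD rs i "")) ([], false)
      = ((PySem.List.pyRange 0 (j : Int) 1).map (pvFmtStep rs), false) := by
  induction j with
  | zero => simp [PySem.List.pyRange_one_eq_nil]
  | succ j ih =>
    have hr : PySem.List.pyRange 0 ((j : Int) + 1) 1 = PySem.List.pyRange 0 (j : Int) 1 ++ [(j : Int)] :=
      PySem.List.pyRange_one_succ_right (by exact_mod_cast Int.natCast_nonneg j)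
    push_cast
    rw [hr, List.foldl_append, ih, List.map_append]
    simp [pvStepB, pvFmtStep]

-- B's single pass, truncating case: the state after scanning [0, j)
theorem pv_B_trunc (rs : List String) (kf ts : Int) (hts : 0 ≤ ts) (hkf : kf < ts) (j : Nat) :
    (PySem.List.pyRange 0 (j : Int) 1).foldl
        (fun st i => pvStepB kf ts true st (i, PySem.List.pyGetD rs i "")) ([], true)
      = if (j : Int) ≤ ts then
          ((PySem.List.pyRange 0 (min kf (j : Int)) 1).map (pvFmtStep rs), true)
        else
          ((PySem.List.pyRange 0 kf 1).map (pvFmtStep rs) ++ ["..."]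
             ++ (PySem.List.pyRange ts (j : Int) 1).map (pvFmtStep rs), false) := by
  induction j with
  | zero =>
    rw [if_pos (by exact_mod_cast hts)]
    simp [PySem.List.pyRange_one_eq_nil (by omega : min kf (0 : Int) ≤ 0), PySem.List.pyRange_one_eq_nil]
  | succ j ih =>
    have hr : PySem.List.pyRange 0 ((j : Int) + 1) 1 = PySem.List.pyRange 0 (j : Int) 1 ++ [(j : Int)] :=
      PySem.List.pyRange_one_succ_right (by exact_mod_cast Int.natCast_nonneg j)
    have hj0 : (0 : Int) ≤ (j : Int) := Int.natCast_nonneg j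
    push_cast
    rw [hr, List.foldl_append, ih]
    by_cases hle : (j : Int) + 1 ≤ ts
    · -- still before the tail
      rw [if_pos (by omega), if_pos hle]
      by_cases hkeep : (j : Int) < kf
      · have hmin1 : min kf (j : Int) = (j : Int) := by omega
        have hmin2 : min kf ((j : Int) + 1) = (j : Int) + 1 := by omega
        rw [hmin1, hmin2, PySem.List.pyRange_one_succ_right hj0, List.map_append]
        simp [pvStepB, hkeep, pvFmtStep, (show ¬ kf ≤ (j : Int) by omega),
              (show ¬ ts ≤ (j : Int) by omega)]
      · have hmin : min kf (j : Int) = kf := by omega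
        have hmin2 : min kf ((j : Int) + 1) = kf := by omega
        rw [hmin, hmin2]
        simp [pvStepB, hkeep, (show ¬ ts ≤ (j : Int) by omega)]
    · by_cases hprev : (j : Int) ≤ ts
      · -- j = ts: the flip step
        have hjts : (j : Int) = ts := by omega
        rw [if_pos hprev, if_neg hle]
        have hmin : min kf (j : Int) = kf := by omega
        rw [hmin]
        have htail : PySem.List.pyRange ts ((j : Int) + 1) 1 = [(j : Int)] := by
          rw [hjts]; exact PySem.List.pyRange_one_singleton ts
        rw [htail]
        simp [pvStepB, pvFmtStep, (show ts ≤ (j : Int) by omega), (show kf ≤ (j : Int) by omega),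
              (show ¬ (j : Int) < kf by omega), List.append_assoc]
      · -- inside the tail
        rw [if_neg hprev, if_neg hle]
        rw [PySem.List.pyRange_one_succ_right (show ts ≤ (j : Int) by omega), List.map_append]
        simp [pvStepB, pvFmtStep, (show ts ≤ (j : Int) by omega), List.append_assoc]

-- B equals the strip-join of the selected parts, inside Pre_ and outside D_
theorem pv_B_eq_sel (rs : List String) (kf kl : Int)
    (hpre : Pre_truncate_reasoning_history rs kf kl) (hnd : ¬ D_truncate_reasoning_history rs kf kl) :
    truncate_reasoning_history_alt rs kf kl = PySem.Str.strip (PySem.Str.join "\n\n" (pvSelParts rs kf kl)) := by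
  unfold truncate_reasoning_history_alt pvSelParts
  simp only [PySem.List.enumerate_eq_map_pyRange rs "", List.foldl_map]
  by_cases hc : (rs.length : Int) ≤ kf + kl
  · rw [if_pos hc]
    have hT : decide (kf + kl < (rs.length : Int)) = false := by simp; omega
    simp only [hT, PySem.List.len]
    rw [pv_B_nontrunc rs kf ((rs.length : Int) - kl) rs.length]
    simp
  · rw [if_neg hc]
    have hkfn : kf ≤ (rs.length : Int) := by
      rcases hpre with h | ⟨h1, _⟩; · omega
      · exact h1
    have hkln : kl ≤ (rs.length : Int) := by
      unfold D_truncate_reasoning_history at hnd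
      by_contra h; exact hnd ⟨by omega, by omega⟩
    have hT : decide (kf + kl < (rs.length : Int)) = true := by simp; omega
    simp only [hT, PySem.List.len]
    rw [pv_B_trunc rs kf ((rs.length : Int) - kl) (by omega) (by omega) rs.length]
    by_cases htl : ((rs.length : Nat) : Int) ≤ (rs.length : Int) - kl
    · -- keep_last_n ≤ 0: empty tail, flag still pending at the end
      rw [if_pos htl]
      have hmin : min kf ((rs.length : Nat) : Int) = kf := by omega
      rw [hmin]
      have htail : PySem.List.pyRange ((rs.length : Int) - kl) (rs.length : Int) 1 = [] :=
        PySem.List.pyRange_one_eq_nil (by omega)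
      simp [htail]
    · rw [if_neg htl]
      simp

-- B's single pass when the whole tail is kept (tail_start ≤ 0 and kf ≤ 0, the D_ region):
-- the flag fires at index 0, every step is kept once
theorem pv_B_trunc_neg (rs : List String) (kf ts : Int) (hts : ts ≤ 0) (hkf : kf ≤ 0) (j : Nat) (hj : 1 ≤ j) :
    (PySem.List.pyRange 0 (j : Int) 1).foldl
        (fun st i => pvStepB kf ts true st (i, PySem.List.pyGetD rs i "")) ([], true)
      = ("..." :: (PySem.List.pyRange 0 (j : Int) 1).map (pvFmtStep rs), false) := by
  induction j with
  | zero => omega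
  | succ j ih =>
    have hr : PySem.List.pyRange 0 ((j : Int) + 1) 1 = PySem.List.pyRange 0 (j : Int) 1 ++ [(j : Int)] :=
      PySem.List.pyRange_one_succ_right (by exact_mod_cast Int.natCast_nonneg j)
    push_cast
    rw [hr, List.foldl_append, List.map_append]
    by_cases hj1 : 1 ≤ j
    · rw [ih hj1]
      simp [pvStepB, pvFmtStep, (show ts ≤ (j : Int) by omega)]
    · have hj0 : j = 0 := by omega
      subst hj0
      simp [PySem.List.pyRange_one_eq_nil (le_refl (0 : Int)),
            pvStepB, pvFmtStep, (show ts ≤ (0 : Int) by omega), (show kf ≤ (0 : Int) by omega)]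

-- B's value inside D_: parts = "..." followed by every step once
theorem pv_B_eq_D (rs : List String) (kf kl : Int)
    (h1 : kf + kl < (rs.length : Int)) (h2 : (rs.length : Int) < kl) (h3 : 1 ≤ rs.length) :
    truncate_reasoning_history_alt rs kf kl
      = PySem.Str.strip (PySem.Str.join "\n\n"
          ("..." :: (PySem.List.pyRange 0 (rs.length : Int) 1).map (pvFmtStep rs))) := by
  unfold truncate_reasoning_history_alt
  simp only [PySem.List.enumerate_eq_map_pyRange rs "", List.foldl_map]
  have hT : decide (kf + kl < (rs.length : Int)) = true := by simp; omega
  simp only [hT, PySem.List.len]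
  rw [pv_B_trunc_neg rs kf ((rs.length : Int) - kl) (by omega) (by omega) rs.length h3]
  simp

-- removing trailing whitespace does not reach past a suffix that still contains non-whitespace
theorem pv_rstrip_append (x y : List Char) (c : Char) (hc : c ∈ y) (hws : PySem.Chars.isspace c = false) :
    PySem.Chars.rstrip (x ++ y) = x ++ PySem.Chars.rstrip y := by
  unfold PySem.Chars.rstrip
  rw [List.reverse_append, List.dropWhile_append]
  have hne : ¬ (List.dropWhile PySem.Chars.isspace y.reverse).isEmpty = true := by
    simp only [List.isEmpty_iff, List.dropWhile_eq_nil_iff]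
    intro h
    exact absurd (h c (by simp [hc])) (by simp [hws])
  rw [if_neg hne, List.reverse_append]
  simp

-- a non-whitespace head survives rstrip
theorem pv_rstrip_cons (c : Char) (l : List Char) (hws : PySem.Chars.isspace c = false) :
    PySem.Chars.rstrip (c :: l) = c :: PySem.Chars.rstrip l := by
  unfold PySem.Chars.rstrip
  rw [(show c :: l = [c] ++ l from rfl), List.reverse_append, List.dropWhile_append]
  by_cases h : (List.dropWhile PySem.Chars.isspace l.reverse).isEmpty = true
  · rw [if_pos h]
    simp only [List.isEmpty_iff] at h
    simp [h, hws]
  · rw [if_neg h]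
    simp

-- str(m) for m ≤ 0 starts with '-' or '0'
theorem pv_toChars_nonpos_head (m : Int) (h : m ≤ 0) :
    (PySem.Int.toChars m).head? = some '-' ∨ (PySem.Int.toChars m).head? = some '0' := by
  by_cases hm : m < 0
  · left; simp [PySem.Int.toChars, hm]
  · right
    have h0 : m = 0 := by omega
    subst h0
    decide

-- the char list of a formatted part, split at the label
theorem pv_fmt_chars (rs : List String) (i : Int) :
    (pvFmtStep rs i).toList
      = ['S', 't', 'e', 'p', ' '] ++ (PySem.Int.toChars (i + 1)
          ++ (':' :: ' ' :: (PySem.List.pyGetD rs i "").toList)) := by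
  simp only [pvFmtStep, String.toList_append, PySem.Int.toList_toStr, List.append_assoc,
    (show "Step ".toList = ['S', 't', 'e', 'p', ' '] from rfl),
    (show ": ".toList = [':', ' '] from rfl)]
  rfl

-- a "\n\n"-join whose first element is x starts with x
theorem pv_join_cons (x : List Char) (rest : List (List Char)) :
    ∃ t, PySem.Chars.join ['\n', '\n'] (x :: rest) = x ++ t := by
  cases rest with
  | nil => exact ⟨[], by simp [PySem.Chars.join_singleton]⟩
  | cons q r =>
    exact ⟨['\n', '\n'] ++ PySem.Chars.join ['\n', '\n'] (q :: r),
      by rw [PySem.Chars.join_cons_cons]; simp [List.append_assoc]⟩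

-- the stripped output for parts '"..." :: fmt(i0) :: …': the first kept step's label survives strip
theorem pv_strip_shape (rs : List String) (i0 : Int) (rest : List (List Char)) :
    ∃ t, PySem.Chars.strip
        (PySem.Chars.join ['\n', '\n'] (['.', '.', '.'] :: (pvFmtStep rs i0).toList :: rest))
      = ['.', '.', '.', '\n', '\n', 'S', 't', 'e', 'p', ' '] ++ (PySem.Int.toChars (i0 + 1) ++ t) := by
  rw [PySem.Chars.join_cons_cons]
  obtain ⟨t, ht⟩ := pv_join_cons (pvFmtStep rs i0).toList rest
  rw [ht, pv_fmt_chars]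
  refine ⟨':' :: PySem.Chars.rstrip (' ' :: ((PySem.List.pyGetD rs i0 "").toList ++ t)), ?_⟩
  have harr : ['.', '.', '.'] ++ ['\n', '\n'] ++
        ((['S', 't', 'e', 'p', ' '] ++ (PySem.Int.toChars (i0 + 1) ++ (':' :: ' ' :: (PySem.List.pyGetD rs i0 "").toList))) ++ t)
      = (['.', '.', '.', '\n', '\n', 'S', 't', 'e', 'p', ' '] ++ PySem.Int.toChars (i0 + 1))
          ++ (':' :: ' ' :: ((PySem.List.pyGetD rs i0 "").toList ++ t)) := by
    simp [List.append_assoc]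
  rw [harr]
  unfold PySem.Chars.strip
  have hl : PySem.Chars.lstrip
      ((['.', '.', '.', '\n', '\n', 'S', 't', 'e', 'p', ' '] ++ PySem.Int.toChars (i0 + 1))
          ++ (':' :: ' ' :: ((PySem.List.pyGetD rs i0 "").toList ++ t)))
      = (['.', '.', '.', '\n', '\n', 'S', 't', 'e', 'p', ' '] ++ PySem.Int.toChars (i0 + 1))
          ++ (':' :: ' ' :: ((PySem.List.pyGetD rs i0 "").toList ++ t)) := by
    simp only [List.cons_append, List.nil_append]
    rw [PySem.Chars.lstrip, List.dropWhile_cons_of_neg (by decide)]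
  rw [hl, pv_rstrip_append _ (':' :: ' ' :: ((PySem.List.pyGetD rs i0 "").toList ++ t)) ':' (by simp) (by decide),
      pv_rstrip_cons ':' _ (by decide)]
  simp

-- a nonempty head survives an append
theorem pv_head_append {x : List Char} (r : List Char) {c : Char} (h : x.head? = some c) :
    (x ++ r).head? = some c := by
  cases x with
  | nil => simp at h
  | cons a l => simpa using h

-- ===== VERDICT (by name: the statement is the Claim_ definition above) =====
theorem truncate_reasoning_history_spec : Claim_unchanged_truncate_reasoning_history := by
  intro rs kf kl _ hpre
  unfold Spec_truncate_reasoning_history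
  intro hnd
  rw [pv_A_eq_sel rs kf kl, pv_B_eq_sel rs kf kl hpre hnd]

theorem truncate_reasoning_history_changed : Claim_changed_truncate_reasoning_history := by
  unfold Claim_changed_truncate_reasoning_history; decide

theorem truncate_reasoning_history_tight : Claim_exact_truncate_reasoning_history := by
  intro rs kf kl _ hpre hD
  obtain ⟨h1, h2⟩ := hD
  have hkl2n : kl ≤ 2 * (rs.length : Int) := by
    rcases hpre with h | ⟨_, h⟩; · omega
    · exact h
  have hn1 : 1 ≤ rs.length := by omega
  -- A's parts: "..." then the wrapped tail starting at the negative index n - kl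
  have hA : truncate_reasoning_history rs kf kl
      = PySem.Str.strip (PySem.Str.join "\n\n"
          ("..." :: (PySem.List.pyRange ((rs.length : Int) - kl) (rs.length : Int) 1).map (pvFmtStep rs))) := by
    rw [pv_A_eq_sel]
    unfold pvSelParts
    rw [if_neg (by omega), PySem.List.pyRange_one_eq_nil (by omega : kf ≤ 0)]
    simp
  have hB := pv_B_eq_D rs kf kl h1 h2 hn1
  rw [hA, hB]
  -- expose the first kept index of each side
  rw [PySem.List.pyRange_one_cons (by omega : (rs.length : Int) - kl < (rs.length : Int)),
      PySem.List.pyRange_one_cons (by exact_mod_cast hn1 : (0 : Int) < (rs.length : Int))]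
  intro hEq
  have hEq' := congrArg String.toList hEq
  rw [PySem.Str.toList_strip, PySem.Str.toList_strip, PySem.Str.toList_join, PySem.Str.toList_join] at hEq'
  simp only [List.map_cons, (show ("..." : String).toList = ['.', '.', '.'] from rfl),
    (show ("\n\n" : String).toList = ['\n', '\n'] from rfl)] at hEq'
  obtain ⟨tA, htA⟩ := pv_strip_shape rs ((rs.length : Int) - kl)
    (((PySem.List.pyRange ((rs.length : Int) - kl + 1) (rs.length : Int) 1).map (pvFmtStep rs)).map String.toList)
  obtain ⟨tB, htB⟩ := pv_strip_shape rs 0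
    (((PySem.List.pyRange (0 + 1) (rs.length : Int) 1).map (pvFmtStep rs)).map String.toList)
  rw [htA, htB] at hEq'
  have hcancel := List.append_cancel_left hEq'
  -- heads: A's label is str(n - kl + 1) with n - kl + 1 ≤ 0; B's label is str(1) = "1"
  have hAhead := pv_toChars_nonpos_head ((rs.length : Int) - kl + 1) (by omega)
  have hBhead : (PySem.Int.toChars (0 + 1)).head? = some '1' := by decide
  have hheads := congrArg List.head? hcancel
  rw [pv_head_append tB hBhead] at hheads
  rcases hAhead with hA' | hA' <;> rw [pv_head_append tA hA'] at hheads <;> simp at hheads
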